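-- pv_equiv track=rewrite | github.com/Serhooi/agentflow-ai-clips-v18 | prompt_optimization.py | smart_content_detection
-- ===== SOURCE A (Python) =====
-- def smart_content_detection(transcript_text: str) -> str:
--     """Быстрое определение типа контента"""
--     text_lower = transcript_text[:500].lower()  # Анализируем только начало
--
--     keywords = {
--         'educational': ['learn', 'teach', 'explain', 'understand', 'how to', 'tutorial', 'guide', 'lesson'],
--         'entertainment': ['funny', 'hilarious', 'joke', 'laugh', 'story', 'amazing', 'crazy', 'wow'],
--         'business': ['business', 'money', 'profit', 'strategy', 'success', 'entrepreneur', 'marketing'],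
--         'tech': ['technology', 'software', 'app', 'digital', 'ai', 'programming', 'code'],
--         'personal': ['life', 'experience', 'personal', 'journey', 'story', 'advice', 'wisdom']
--     }
--
--     scores = {}
--     for category, words in keywords.items():
--         scores[category] = sum(1 for word in words if word in text_lower)
--
--     return max(scores, key=scores.get) if max(scores.values()) > 0 else 'general'
-- ===== SOURCE B (Python) =====
-- def smart_content_detection(transcript_text: str) -> str:
--     """Inverted-index variant: one pass over distinct keywords feeding a counter,
--     then one running-best scan over the category order."""
--     text_lower = transcript_text[:500].lower()
--
--     # word -> categories it counts for ('story' counts for two)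
--     word_cats = {
--         'learn': ['educational'], 'teach': ['educational'], 'explain': ['educational'],
--         'understand': ['educational'], 'how to': ['educational'], 'tutorial': ['educational'],
--         'guide': ['educational'], 'lesson': ['educational'],
--         'funny': ['entertainment'], 'hilarious': ['entertainment'], 'joke': ['entertainment'],
--         'laugh': ['entertainment'],
--         'business': ['business'], 'money': ['business'], 'profit': ['business'],
--         'strategy': ['business'], 'success': ['business'], 'entrepreneur': ['business'],
--         'marketing': ['business'],
--         'technology': ['tech'], 'software': ['tech'], 'app': ['tech'], 'digital': ['tech'],
--         'ai': ['tech'], 'programming': ['tech'], 'code': ['tech'],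
--         'life': ['personal'], 'experience': ['personal'], 'personal': ['personal'],
--         'journey': ['personal'],
--         'story': ['entertainment', 'personal'],
--         'amazing': ['entertainment'], 'crazy': ['entertainment'], 'wow': ['entertainment'],
--         'advice': ['personal'], 'wisdom': ['personal'],
--     }
--
--     counts = {}
--     for word, cats in word_cats.items():
--         if word in text_lower:
--             for cat in cats:
--                 counts[cat] = counts.get(cat, 0) + 1
--
--     best_cat = 'general'
--     best = 0
--     for cat in ['educational', 'entertainment', 'business', 'tech', 'personal']:
--         c = counts.get(cat, 0)
--         if c > best:
--             best_cat, best = cat, c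
--     return best_cat
-- ===== Notes on version B (the rewrite author's own statement) =====
-- stated objective: alternative
-- what changed: B inverts the table into a word->categories index, makes one pass over the distinct keywords (each membership test done once, so the duplicated 'story' test disappears) feeding a category counter dict, then selects with a single running-best scan instead of building a scores dict and calling max twice.
import Mathlib
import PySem

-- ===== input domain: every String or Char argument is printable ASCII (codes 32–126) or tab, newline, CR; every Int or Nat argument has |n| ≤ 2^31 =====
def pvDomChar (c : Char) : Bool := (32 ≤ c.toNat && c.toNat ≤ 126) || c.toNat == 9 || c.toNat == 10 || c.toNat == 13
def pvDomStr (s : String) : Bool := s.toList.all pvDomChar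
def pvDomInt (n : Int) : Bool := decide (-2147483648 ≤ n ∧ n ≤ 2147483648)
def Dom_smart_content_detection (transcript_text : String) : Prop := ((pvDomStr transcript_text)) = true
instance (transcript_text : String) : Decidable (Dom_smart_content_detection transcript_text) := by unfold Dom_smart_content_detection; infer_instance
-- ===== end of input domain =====

-- B inverts A's category->keywords table into a word->categories index, counts hits in one pass
-- over distinct keywords into a counter dict, then selects with one running-best scan; objective: alternative.

-- ===== PORT A =====
def pvKeywords : PySem.Dict String (List String) := PySem.Dict.ofList [
  ("educational", ["learn", "teach", "explain", "understand", "how to", "tutorial", "guide", "lesson"]),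
  ("entertainment", ["funny", "hilarious", "joke", "laugh", "story", "amazing", "crazy", "wow"]),
  ("business", ["business", "money", "profit", "strategy", "success", "entrepreneur", "marketing"]),
  ("tech", ["technology", "software", "app", "digital", "ai", "programming", "code"]),
  ("personal", ["life", "experience", "personal", "journey", "story", "advice", "wisdom"])]

def smart_content_detection (transcript_text : String) : String :=
  let text_lower := PySem.Str.lower (PySem.Str.slice transcript_text none (some 500))
  let scores : PySem.Dict String Int :=
    pvKeywords.items.foldl (fun sc p =>
      PySem.Dict.insert sc p.1
        ((p.2.map (fun word => if PySem.Str.isIn word text_lower then (1 : Int) else 0)).sum))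
      PySem.Dict.empty
  match PySem.List.max? scores.values (fun v => v) with
  | none => ""          -- unreachable: scores is nonempty (Python max would raise on an empty dict)
  | some m =>
      if m > 0 then
        match PySem.List.max? scores.keys (fun k => (scores.get? k).getD 0) with
        | none => ""    -- unreachable
        | some k => k
      else "general"

-- ===== PORT B =====
-- word -> categories it counts for ('story' counts for two)
def pvWCList : List (String × List String) := [
  ("learn", ["educational"]), ("teach", ["educational"]), ("explain", ["educational"]),
  ("understand", ["educational"]), ("how to", ["educational"]), ("tutorial", ["educational"]),
  ("guide", ["educational"]), ("lesson", ["educational"]),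
  ("funny", ["entertainment"]), ("hilarious", ["entertainment"]), ("joke", ["entertainment"]),
  ("laugh", ["entertainment"]),
  ("business", ["business"]), ("money", ["business"]), ("profit", ["business"]),
  ("strategy", ["business"]), ("success", ["business"]), ("entrepreneur", ["business"]),
  ("marketing", ["business"]),
  ("technology", ["tech"]), ("software", ["tech"]), ("app", ["tech"]), ("digital", ["tech"]),
  ("ai", ["tech"]), ("programming", ["tech"]), ("code", ["tech"]),
  ("life", ["personal"]), ("experience", ["personal"]), ("personal", ["personal"]),
  ("journey", ["personal"]),
  ("story", ["entertainment", "personal"]),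
  ("amazing", ["entertainment"]), ("crazy", ["entertainment"]), ("wow", ["entertainment"]),
  ("advice", ["personal"]), ("wisdom", ["personal"])]

def pvWordCats : PySem.Dict String (List String) := PySem.Dict.ofList pvWCList

def smart_content_detection_alt (transcript_text : String) : String :=
  let text_lower := PySem.Str.lower (PySem.Str.slice transcript_text none (some 500))
  let counts : PySem.Dict String Int :=
    pvWordCats.items.foldl (fun cts p =>
      if PySem.Str.isIn p.1 text_lower then
        p.2.foldl (fun cts cat => PySem.Dict.insert cts cat (cts.getD cat 0 + 1)) cts
      else cts) PySem.Dict.empty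
  let best := ["educational", "entertainment", "business", "tech", "personal"].foldl
      (fun best cat =>
        if counts.getD cat 0 > best.2 then (cat, counts.getD cat 0) else best)
      ("general", (0 : Int))
  best.1

-- ===== PRECONDITION & SPEC =====
def Spec_smart_content_detection (transcript_text : String) (out : String) : Prop := out = smart_content_detection_alt transcript_text
instance (transcript_text : String) (out : String) : Decidable (Spec_smart_content_detection transcript_text out) := by unfold Spec_smart_content_detection; infer_instance

-- ===== CLAIM (what is proved, stated in full; the proofs are below) =====
def Claim_equal_smart_content_detection : Prop := ∀ (transcript_text : String), Dom_smart_content_detection transcript_text → Spec_smart_content_detection transcript_text (smart_content_detection transcript_text)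

-- ===== LEMMAS AND PROOFS =====

/-- Number of keywords of `ws` occurring in `tl`, as A computes it (sum of 0/1). -/
def cnt (ws : List String) (tl : String) : Int :=
  (ws.map (fun word => if PySem.Str.isIn word tl then (1 : Int) else 0)).sum

set_option maxHeartbeats 1000000 in
/-- A's scores dict, computed: the insertion loop over the literal keyword dict appends the five
    (category, count) pairs in order. -/
lemma scores_eq (tl : String) :
  (pvKeywords.items.foldl (fun sc p =>
      PySem.Dict.insert sc p.1
        ((p.2.map (fun word => if PySem.Str.isIn word tl then (1 : Int) else 0)).sum))
      PySem.Dict.empty)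
  = PySem.Dict.mk [("educational", cnt ["learn", "teach", "explain", "understand", "how to", "tutorial", "guide", "lesson"] tl),
      ("entertainment", cnt ["funny", "hilarious", "joke", "laugh", "story", "amazing", "crazy", "wow"] tl),
      ("business", cnt ["business", "money", "profit", "strategy", "success", "entrepreneur", "marketing"] tl),
      ("tech", cnt ["technology", "software", "app", "digital", "ai", "programming", "code"] tl),
      ("personal", cnt ["life", "experience", "personal", "journey", "story", "advice", "wisdom"] tl)] := rfl

/-- B's inner bump loop adds, for each key, the number of its occurrences in the bumped list. -/
lemma bump_getD (cs : List String) : ∀ (d : PySem.Dict String Int) (c : String),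
    (cs.foldl (fun d cat => PySem.Dict.insert d cat (d.getD cat 0 + 1)) d).getD c 0
      = d.getD c 0 + (cs.count c : Int) := by
  induction cs with
  | nil => intro d c; simp
  | cons x xs ih =>
      intro d c
      rw [List.foldl_cons, ih, List.count_cons]
      by_cases h : c = x
      · subst h; simp [PySem.Dict.getD_insert_self]; ring
      · have hb : ¬ (x == c) := by simpa using fun e => h e.symm
        simp [PySem.Dict.getD_insert_of_ne _ _ _ h, hb]

/-- B's counter loop: each key's final count is the sum, over the word table, of its
    multiplicity for words present in the text. -/
lemma counter_getD (tl : String) : ∀ (L : List (String × List String)) (d : PySem.Dict String Int) (c : String),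
    (L.foldl (fun cts p =>
        if PySem.Str.isIn p.1 tl then
          p.2.foldl (fun cts cat => PySem.Dict.insert cts cat (cts.getD cat 0 + 1)) cts
        else cts) d).getD c 0
      = d.getD c 0 + (L.map (fun p => if PySem.Str.isIn p.1 tl then (p.2.count c : Int) else 0)).sum := by
  intro L
  induction L with
  | nil => intro d c; simp
  | cons p ps ih =>
      intro d c
      rw [List.foldl_cons, List.map_cons, List.sum_cons, ih]
      by_cases h : PySem.Str.isIn p.1 tl
      · rw [if_pos h, if_pos h, bump_getD]; ring
      · rw [if_neg h, if_neg h]; ring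

/-- One step of Python `max`'s scan over an optional accumulator. -/
def myStep (val : String → Int) (acc : Option String) (y : String) : Option String :=
  match acc with
  | none => some y
  | some m => if val m < val y then some y else some m

/-- `max?` on a nonempty list is the plain running-argmax fold (first maximum kept). -/
lemma max?_cons_eq (val : String → Int) (x : String) (xs : List String) :
    PySem.List.max? (x :: xs) val
      = some (xs.foldl (fun m k => if val m < val k then k else m) x) := by
  have aux : ∀ (l : List String) (a : String),
      l.foldl (myStep val) (some a)
      = some (l.foldl (fun m k => if val m < val k then k else m) a) := by
    intro l
    induction l with
    | nil => intro a; rfl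
    | cons y ys ih =>
        intro a
        rw [List.foldl_cons, List.foldl_cons]
        have h : myStep val (some a) y = some (if val a < val y then y else a) := by
          simp only [myStep]; split <;> rfl
        rw [h, ih]
  show List.foldl _ none (x :: xs) = _
  refine Eq.trans (PySem.List.foldl_congr_mem _ _ (myStep val) _ ?_) ?_
  · intro acc y _; cases acc <;> rfl
  rw [List.foldl_cons]
  have h0 : myStep val none x = some x := rfl
  rw [h0]
  exact aux xs x

/-- A running-best (pair) loop is the running-argmax (key) loop, paired with its value. -/
lemma pairfold_eq {α : Type} (val : String → Int) (v : α → Int) (key : α → String) :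
    ∀ (l : List α) (b : String × Int), (∀ p ∈ l, val (key p) = v p) → val b.1 = b.2 →
    l.foldl (fun best p => if v p > best.2 then (key p, v p) else best) b
      = ((l.map key).foldl (fun m k => if val m < val k then k else m) b.1,
         val ((l.map key).foldl (fun m k => if val m < val k then k else m) b.1)) := by
  intro l
  induction l with
  | nil => intro b _ hb; rw [List.foldl_nil, List.map_nil, List.foldl_nil, hb]
  | cons a as ih =>
      intro b hval hb
      rw [List.foldl_cons, List.map_cons, List.foldl_cons]
      have hk : val (key a) = v a := hval a (List.mem_cons_self ..)
      have hval' : ∀ p ∈ as, val (key p) = v p := fun p hp => hval p (List.mem_cons_of_mem _ hp)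
      by_cases h : v a > b.2
      · rw [if_pos h, if_pos (by omega : val b.1 < val (key a))]
        exact ih (key a, v a) hval' hk
      · rw [if_neg h, if_neg (by omega : ¬ val b.1 < val (key a))]
        exact ih b hval' hb

/-- The running argmax stays put when no later value beats the accumulator. -/
lemma Cstay (val : String → Int) :
    ∀ (keys : List String) (g : String), (∀ k ∈ keys, val k ≤ val g) →
    keys.foldl (fun m k => if val m < val k then k else m) g = g := by
  intro keys
  induction keys with
  | nil => intro g _; rfl
  | cons k ks ih =>
      intro g h
      rw [List.foldl_cons, if_neg (by have := h k (List.mem_cons_self ..); omega)]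
      exact ih g (fun x hx => h x (List.mem_cons_of_mem _ hx))

/-- Two running argmaxes agree when some later element strictly beats both starts. -/
lemma Cjump (val : String → Int) :
    ∀ (keys : List String) (g1 g2 : String),
    (∃ w ∈ keys, val g1 < val w ∧ val g2 < val w) →
    keys.foldl (fun m k => if val m < val k then k else m) g1
      = keys.foldl (fun m k => if val m < val k then k else m) g2 := by
  intro keys
  induction keys with
  | nil => rintro g1 g2 ⟨w, hw, _⟩; exact absurd hw (List.not_mem_nil)
  | cons k ks ih =>
      rintro g1 g2 ⟨w, hw, h1, h2⟩
      rw [List.foldl_cons, List.foldl_cons]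
      by_cases hk1 : val g1 < val k
      · by_cases hk2 : val g2 < val k
        · rw [if_pos hk1, if_pos hk2]
        · rw [if_pos hk1, if_neg hk2]
          rcases List.mem_cons.mp hw with rfl | hw'
          · omega
          · exact ih k g2 ⟨w, hw', by omega, h2⟩
      · rw [if_neg hk1]
        rcases List.mem_cons.mp hw with rfl | hw'
        · omega
        · by_cases hk2 : val g2 < val k
          · rw [if_pos hk2]
            exact ih g1 k ⟨w, hw', h1, by omega⟩
          · rw [if_neg hk2]
            exact ih g1 g2 ⟨w, hw', h1, h2⟩

/-- The heart of the equivalence: A's "max of values, then first argmax key, else general"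
    equals B's single running-best chain seeded with ("general", 0). -/
lemma final5 (val : String → Int) (k1 k2 k3 k4 k5 g : String) (hg : val g = 0) :
    (if [val k2, val k3, val k4, val k5].foldl max (val k1) > 0
      then [k2, k3, k4, k5].foldl (fun m k => if val m < val k then k else m) k1
      else g)
    = [k1, k2, k3, k4, k5].foldl (fun m k => if val m < val k then k else m) g := by
  rw [List.foldl_cons (f := fun m k => if val m < val k then k else m) (b := g)]
  by_cases h1 : val g < val k1
  · rw [if_pos h1,
      if_pos (by simp only [List.foldl]; omega : [val k2, val k3, val k4, val k5].foldl max (val k1) > 0)]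
  · rw [if_neg h1]
    by_cases hM : [val k2, val k3, val k4, val k5].foldl max (val k1) > 0
    · rw [if_pos hM]
      have hor : 0 < val k2 ∨ 0 < val k3 ∨ 0 < val k4 ∨ 0 < val k5 := by
        simp only [List.foldl] at hM; omega
      rcases hor with h | h | h | h
      · exact Cjump val _ k1 g ⟨k2, by simp, by omega, by omega⟩
      · exact Cjump val _ k1 g ⟨k3, by simp, by omega, by omega⟩
      · exact Cjump val _ k1 g ⟨k4, by simp, by omega, by omega⟩
      · exact Cjump val _ k1 g ⟨k5, by simp, by omega, by omega⟩
    · rw [if_neg hM]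
      refine (Cstay val _ g ?_).symm
      intro k hk
      simp only [List.foldl] at hM
      rcases (by simpa using hk : k = k2 ∨ k = k3 ∨ k = k4 ∨ k = k5) with rfl | rfl | rfl | rfl <;> omega

set_option maxRecDepth 10000 in
lemma items_wc : pvWordCats.items = pvWCList := rfl

/-- Per-category total of B's word table: sum over words present of the category's multiplicity. -/
def catSum (tl : String) (c : String) : Int :=
  (pvWordCats.items.map (fun p => if PySem.Str.isIn p.1 tl then (p.2.count c : Int) else 0)).sum

set_option maxHeartbeats 1000000 in
lemma vEdu (tl : String) : catSum tl "educational" = cnt ["learn","teach","explain","understand","how to","tutorial","guide","lesson"] tl := by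
  rw [catSum, items_wc]; simp [pvWCList, cnt]; rfl
set_option maxHeartbeats 1000000 in
lemma vEnt (tl : String) : catSum tl "entertainment" = cnt ["funny","hilarious","joke","laugh","story","amazing","crazy","wow"] tl := by
  rw [catSum, items_wc]; simp [pvWCList, cnt]; rfl
set_option maxHeartbeats 1000000 in
lemma vBus (tl : String) : catSum tl "business" = cnt ["business","money","profit","strategy","success","entrepreneur","marketing"] tl := by
  rw [catSum, items_wc]; simp [pvWCList, cnt]; rfl
set_option maxHeartbeats 1000000 in
lemma vTech (tl : String) : catSum tl "tech" = cnt ["technology","software","app","digital","ai","programming","code"] tl := by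
  rw [catSum, items_wc]; simp [pvWCList, cnt]; rfl
set_option maxHeartbeats 1000000 in
lemma vPer (tl : String) : catSum tl "personal" = cnt ["life","experience","personal","journey","story","advice","wisdom"] tl := by
  rw [catSum, items_wc]; simp [pvWCList, cnt]; rfl
set_option maxHeartbeats 2000000 in
lemma AB (t : String) : smart_content_detection t = smart_content_detection_alt t := by
  unfold smart_content_detection smart_content_detection_alt
  simp only []
  rw [scores_eq]
  dsimp only [PySem.Dict.values, PySem.Dict.keys, List.map]
  set tl : String := PySem.Str.lower (PySem.Str.slice t none (some 500)) with htl
  set d : PySem.Dict String Int := PySem.Dict.mk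
      [("educational", cnt ["learn", "teach", "explain", "understand", "how to", "tutorial", "guide", "lesson"] tl),
       ("entertainment", cnt ["funny", "hilarious", "joke", "laugh", "story", "amazing", "crazy", "wow"] tl),
       ("business", cnt ["business", "money", "profit", "strategy", "success", "entrepreneur", "marketing"] tl),
       ("tech", cnt ["technology", "software", "app", "digital", "ai", "programming", "code"] tl),
       ("personal", cnt ["life", "experience", "personal", "journey", "story", "advice", "wisdom"] tl)] with hd
  set counts : PySem.Dict String Int :=
    pvWordCats.items.foldl (fun cts p =>
      if PySem.Str.isIn p.1 tl then
        p.2.foldl (fun cts cat => PySem.Dict.insert cts cat (cts.getD cat 0 + 1)) cts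
      else cts) PySem.Dict.empty with hcts
  have hcnt : ∀ c, counts.getD c 0 = catSum tl c := by
    intro c
    rw [hcts, counter_getD]
    simp [catSum]
  have e1 : (((d.get? "educational").getD 0 : Int)) = cnt ["learn", "teach", "explain", "understand", "how to", "tutorial", "guide", "lesson"] tl := by rw [hd]; rfl
  have e2 : (((d.get? "entertainment").getD 0 : Int)) = cnt ["funny", "hilarious", "joke", "laugh", "story", "amazing", "crazy", "wow"] tl := by rw [hd]; rfl
  have e3 : (((d.get? "business").getD 0 : Int)) = cnt ["business", "money", "profit", "strategy", "success", "entrepreneur", "marketing"] tl := by rw [hd]; rfl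
  have e4 : (((d.get? "tech").getD 0 : Int)) = cnt ["technology", "software", "app", "digital", "ai", "programming", "code"] tl := by rw [hd]; rfl
  have e5 : (((d.get? "personal").getD 0 : Int)) = cnt ["life", "experience", "personal", "journey", "story", "advice", "wisdom"] tl := by rw [hd]; rfl
  have eg : (((d.get? "general").getD 0 : Int)) = 0 := by rw [hd]; rfl
  rw [PySem.List.max?_id_cons]
  dsimp only []
  rw [max?_cons_eq]
  dsimp only []
  have hB := pairfold_eq
    (val := fun k => ((d.get? k).getD 0 : Int))
    (v := fun cat => counts.getD cat 0)
    (key := fun c => c)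
    ["educational", "entertainment", "business", "tech", "personal"] ("general", 0)
    (by
      intro p hp
      fin_cases hp
      · exact e1.trans ((hcnt "educational").trans (vEdu tl)).symm
      · exact e2.trans ((hcnt "entertainment").trans (vEnt tl)).symm
      · exact e3.trans ((hcnt "business").trans (vBus tl)).symm
      · exact e4.trans ((hcnt "tech").trans (vTech tl)).symm
      · exact e5.trans ((hcnt "personal").trans (vPer tl)).symm)
    (by exact eg)
  simp only [List.map] at hB
  rw [hB]
  dsimp only []
  have hfin := final5 (fun k => ((d.get? k).getD 0 : Int)) "educational" "entertainment" "business" "tech" "personal" "general" eg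
  simp only [] at hfin
  rw [e1, e2, e3, e4, e5] at hfin
  exact hfin

-- ===== VERDICT (by name: the statement is the Claim_ definition above) =====
theorem smart_content_detection_spec : Claim_equal_smart_content_detection := by
  intro t _
  show smart_content_detection t = smart_content_detection_alt t
  exact AB t
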